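-- pv_equiv track=rewrite | github.com/Fet-ycliang/ai-dev-kit | databricks-builder-app/server/services/skills_manager.py | get_allowed_mcp_tools
-- ===== SOURCE A (Python) =====
-- SKILL_TOOL_MAPPING: dict[str, list[str]] = {
--   'databricks-agent-bricks': ['manage_ka', 'manage_mas'],
--   'databricks-aibi-dashboards': [
--     'create_or_update_dashboard', 'get_dashboard',
--     'delete_dashboard', 'publish_dashboard',
--   ],
--   'databricks-genie': [
--     'create_or_update_genie', 'get_genie', 'delete_genie', 'ask_genie',
--   ],
--   'databricks-spark-declarative-pipelines': [
--     'create_or_update_pipeline', 'get_pipeline',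
--     'delete_pipeline', 'run_pipeline',
--   ],
--   'databricks-model-serving': [
--     'get_serving_endpoint_status', 'query_serving_endpoint', 'list_serving_endpoints',
--   ],
--   'databricks-jobs': [
--     'list_jobs', 'get_job', 'find_job_by_name', 'create_job', 'update_job',
--     'delete_job', 'run_job_now', 'get_run', 'get_run_output', 'cancel_run',
--     'list_runs', 'wait_for_run',
--   ],
--   'databricks-unity-catalog': [
--     'manage_uc_objects', 'manage_uc_grants', 'manage_uc_storage',
--     'manage_uc_connections', 'manage_uc_tags', 'manage_uc_security_policies',
--     'manage_uc_monitors', 'manage_uc_sharing',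
--     'list_volume_files', 'upload_to_volume', 'download_from_volume',
--     'delete_volume_file', 'delete_volume_directory', 'create_volume_directory',
--     'get_volume_file_info',
--   ],
--   # APX (FastAPI+React) 和 Python (Dash/Streamlit/etc.) 共享相同的
--   # 應用程式生命週期工具 — 技能內容不同，非 MCP 操作。
--   'databricks-app-apx': [
--     'create_or_update_app', 'get_app', 'delete_app',
--   ],
--   'databricks-app-python': [
--     'create_or_update_app', 'get_app', 'delete_app',
--   ],
-- }
--
-- def get_allowed_mcp_tools(
--   all_tool_names: list[str],
--   enabled_skills: list[str] | None = None,
-- ) -> list[str]: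
--   """根據啟用的技能過濾 MCP 工具名稱。
--
--   映射到停用技能的工具會被移除。未映射到任何技能的工具
--   （例如 execute_sql、compute 工具）始終保留。
--
--   Args:
--       all_tool_names: 完整的 MCP 工具名稱列表（mcp__databricks__xxx 格式）
--       enabled_skills: 啟用的技能名稱列表，或 None 代表所有技能。
--
--   Returns:
--       過濾後允許的 MCP 工具名稱列表。
--   """
--   if enabled_skills is None:
--     return all_tool_names
--
--   # 收集屬於停用技能的工具名稱
--   enabled_set = set(enabled_skills)
--   blocked_tools: set[str] = set()
--   for skill_name, tool_names in SKILL_TOOL_MAPPING.items():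
--     if skill_name not in enabled_set:
--       blocked_tools.update(tool_names)
--
--   # 若工具也被啟用的技能宣稱則不阻擋
--   for skill_name in enabled_skills:
--     for tool_name in SKILL_TOOL_MAPPING.get(skill_name, []):
--       blocked_tools.discard(tool_name)
--
--   # 過濾：工具名稱格式為 mcp__databricks__{name}
--   prefix = 'mcp__databricks__'
--   return [
--     t for t in all_tool_names
--     if not t.startswith(prefix) or t[len(prefix):] not in blocked_tools
--   ]
-- ===== SOURCE B (Python) =====
-- SKILL_TOOL_MAPPING: dict[str, list[str]] = {
--   'databricks-agent-bricks': ['manage_ka', 'manage_mas'],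
--   'databricks-aibi-dashboards': [
--     'create_or_update_dashboard', 'get_dashboard',
--     'delete_dashboard', 'publish_dashboard',
--   ],
--   'databricks-genie': [
--     'create_or_update_genie', 'get_genie', 'delete_genie', 'ask_genie',
--   ],
--   'databricks-spark-declarative-pipelines': [
--     'create_or_update_pipeline', 'get_pipeline',
--     'delete_pipeline', 'run_pipeline',
--   ],
--   'databricks-model-serving': [
--     'get_serving_endpoint_status', 'query_serving_endpoint', 'list_serving_endpoints',
--   ],
--   'databricks-jobs': [
--     'list_jobs', 'get_job', 'find_job_by_name', 'create_job', 'update_job',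
--     'delete_job', 'run_job_now', 'get_run', 'get_run_output', 'cancel_run',
--     'list_runs', 'wait_for_run',
--   ],
--   'databricks-unity-catalog': [
--     'manage_uc_objects', 'manage_uc_grants', 'manage_uc_storage',
--     'manage_uc_connections', 'manage_uc_tags', 'manage_uc_security_policies',
--     'manage_uc_monitors', 'manage_uc_sharing',
--     'list_volume_files', 'upload_to_volume', 'download_from_volume',
--     'delete_volume_file', 'delete_volume_directory', 'create_volume_directory',
--     'get_volume_file_info',
--   ],
--   'databricks-app-apx': [
--     'create_or_update_app', 'get_app', 'delete_app',
--   ],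
--   'databricks-app-python': [
--     'create_or_update_app', 'get_app', 'delete_app',
--   ],
-- }
--
-- # Inverted index, built once at import time: tool name -> list of skills that claim it.
-- _TOOL_TO_SKILLS: dict[str, list[str]] = {}
-- for _skill, _tools in SKILL_TOOL_MAPPING.items():
--   for _t in _tools:
--     _TOOL_TO_SKILLS[_t] = _TOOL_TO_SKILLS.get(_t, []) + [_skill]
--
--
-- def get_allowed_mcp_tools(
--   all_tool_names: list[str],
--   enabled_skills: list[str] | None = None,
-- ) -> list[str]:
--   """Inverted-index formulation: a prefixed tool is kept iff it is owned by
--   no skill at all, or some skill owning it is enabled."""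
--   if enabled_skills is None:
--     return all_tool_names
--
--   enabled = set(enabled_skills)
--   prefix = 'mcp__databricks__'
--   return [
--     t for t in all_tool_names
--     if not t.startswith(prefix)
--     or t[len(prefix):] not in _TOOL_TO_SKILLS
--     or any(s in enabled for s in _TOOL_TO_SKILLS[t[len(prefix):]])
--   ]
-- ===== Notes on version B (the rewrite author's own statement) =====
-- stated objective: alternative
-- what changed: B inverts the data structure: it builds a tool->owning-skills index once from SKILL_TOOL_MAPPING and keeps a prefixed tool iff its suffix has no owners or one of its owners is in the enabled set, so no blocked/allowed tool set is ever derived from enabled_skills.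
import Mathlib
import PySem

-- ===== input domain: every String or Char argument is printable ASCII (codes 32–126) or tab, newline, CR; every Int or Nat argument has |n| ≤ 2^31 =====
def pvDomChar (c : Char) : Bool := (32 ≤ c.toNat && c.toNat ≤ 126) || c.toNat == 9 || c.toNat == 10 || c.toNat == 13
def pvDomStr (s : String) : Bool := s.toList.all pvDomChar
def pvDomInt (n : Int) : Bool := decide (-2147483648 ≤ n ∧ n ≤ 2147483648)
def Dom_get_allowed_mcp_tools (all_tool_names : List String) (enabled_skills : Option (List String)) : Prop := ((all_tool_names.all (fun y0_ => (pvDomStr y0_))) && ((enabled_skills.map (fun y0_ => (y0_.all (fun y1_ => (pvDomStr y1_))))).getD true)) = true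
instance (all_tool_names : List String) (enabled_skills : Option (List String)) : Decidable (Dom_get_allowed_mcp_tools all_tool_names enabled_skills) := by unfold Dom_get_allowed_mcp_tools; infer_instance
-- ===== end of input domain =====

-- B replaces A's blocklist (tools of disabled skills minus tools reclaimed by enabled skills)
-- by an inverted index tool -> owning skills built once from the mapping; a prefixed tool is kept
-- iff it has no owners or some owner is enabled. Same results.

-- shared module-level constant SKILL_TOOL_MAPPING
def pvSkillToolMapping : PySem.Dict String (List String) := PySem.Dict.ofList [
  ("databricks-agent-bricks", ["manage_ka", "manage_mas"]),
  ("databricks-aibi-dashboards", ["create_or_update_dashboard", "get_dashboard",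
    "delete_dashboard", "publish_dashboard"]),
  ("databricks-genie", ["create_or_update_genie", "get_genie", "delete_genie", "ask_genie"]),
  ("databricks-spark-declarative-pipelines", ["create_or_update_pipeline", "get_pipeline",
    "delete_pipeline", "run_pipeline"]),
  ("databricks-model-serving", ["get_serving_endpoint_status", "query_serving_endpoint",
    "list_serving_endpoints"]),
  ("databricks-jobs", ["list_jobs", "get_job", "find_job_by_name", "create_job", "update_job",
    "delete_job", "run_job_now", "get_run", "get_run_output", "cancel_run",
    "list_runs", "wait_for_run"]),
  ("databricks-unity-catalog", ["manage_uc_objects", "manage_uc_grants", "manage_uc_storage",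
    "manage_uc_connections", "manage_uc_tags", "manage_uc_security_policies",
    "manage_uc_monitors", "manage_uc_sharing",
    "list_volume_files", "upload_to_volume", "download_from_volume",
    "delete_volume_file", "delete_volume_directory", "create_volume_directory",
    "get_volume_file_info"]),
  ("databricks-app-apx", ["create_or_update_app", "get_app", "delete_app"]),
  ("databricks-app-python", ["create_or_update_app", "get_app", "delete_app"])]

-- ===== PORT A =====
def get_allowed_mcp_tools (all_tool_names : List String) (enabled_skills : Option (List String)) : List String :=
  match enabled_skills with
  | none => all_tool_names
  | some enabled_skills =>
    -- enabled_set = set(enabled_skills); blocked = union of tools of skills not in enabled_set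
    let enabled_set : PySem.Set String := PySem.Set.ofList enabled_skills
    let blocked : PySem.Set String :=
      pvSkillToolMapping.items.foldl
        (fun blocked p => if enabled_set.contains p.1 then blocked else PySem.Set.update blocked p.2)
        PySem.Set.empty
    -- for skill_name in enabled_skills: for tool_name in get(skill_name, []): blocked.discard(tool_name)
    let blocked : PySem.Set String :=
      enabled_skills.foldl
        (fun blocked skill => (pvSkillToolMapping.getD skill []).foldl PySem.Set.discard blocked)
        blocked
    let pfx := "mcp__databricks__"
    all_tool_names.filter (fun t =>
      !(PySem.Str.startswith t pfx) ||
        !(blocked.contains (PySem.Str.slice t (some (PySem.Str.len pfx)) none)))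

-- ===== PORT B =====
-- module-level inverted index: _TOOL_TO_SKILLS[t] = _TOOL_TO_SKILLS.get(t, []) + [skill]
def pvToolToSkills : PySem.Dict String (List String) :=
  pvSkillToolMapping.items.foldl
    (fun d p => p.2.foldl (fun d t => d.insert t (d.getD t [] ++ [p.1])) d)
    PySem.Dict.empty

def get_allowed_mcp_tools_alt (all_tool_names : List String) (enabled_skills : Option (List String)) : List String :=
  match enabled_skills with
  | none => all_tool_names
  | some enabled_skills =>
    let enabled : PySem.Set String := PySem.Set.ofList enabled_skills
    let pfx := "mcp__databricks__"
    -- keep t: not prefixed, or no skill owns the suffix, or some owner is enabled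
    all_tool_names.filter (fun t =>
      !(PySem.Str.startswith t pfx) ||
      !(pvToolToSkills.contains (PySem.Str.slice t (some (PySem.Str.len pfx)) none)) ||
      ((pvToolToSkills.getD (PySem.Str.slice t (some (PySem.Str.len pfx)) none) []).any
        (fun s => enabled.contains s)))

-- ===== PRECONDITION & SPEC =====
def Spec_get_allowed_mcp_tools (all_tool_names : List String) (enabled_skills : Option (List String)) (out : List String) : Prop := out = get_allowed_mcp_tools_alt all_tool_names enabled_skills
instance (all_tool_names : List String) (enabled_skills : Option (List String)) (out : List String) : Decidable (Spec_get_allowed_mcp_tools all_tool_names enabled_skills out) := by unfold Spec_get_allowed_mcp_tools; infer_instance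

-- ===== CLAIM (what is proved, stated in full; the proofs are below) =====
def Claim_equal_get_allowed_mcp_tools : Prop := ∀ (all_tool_names : List String) (enabled_skills : Option (List String)), Dom_get_allowed_mcp_tools all_tool_names enabled_skills → Spec_get_allowed_mcp_tools all_tool_names enabled_skills (get_allowed_mcp_tools all_tool_names enabled_skills)

-- ===== LEMMAS AND PROOFS =====

-- membership in A's first loop (union of tool lists of keys not in the enabled set)
theorem pv_mem_blockfold (items : List (String × List String)) (es : PySem.Set String)
    (s : PySem.Set String) (x : String) :
    x ∈ items.foldl (fun b p => if es.contains p.1 then b else PySem.Set.update b p.2) s ↔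
      x ∈ s ∨ ∃ p ∈ items, ¬ p.1 ∈ es ∧ x ∈ p.2 := by
  induction items generalizing s with
  | nil => simp
  | cons p rest ih =>
    simp only [List.foldl]
    rw [ih]
    by_cases hm : p.1 ∈ es
    · rw [if_pos ((PySem.Set.contains_iff es p.1).mpr hm)]
      simp [hm]
    · rw [if_neg (fun hc => hm ((PySem.Set.contains_iff es p.1).mp hc))]
      simp [PySem.Set.mem_update, hm]
      tauto

-- membership after discarding every element of a list
theorem pv_mem_discardfold (l : List String) (s : PySem.Set String) (x : String) :
    x ∈ l.foldl PySem.Set.discard s ↔ x ∈ s ∧ ¬ x ∈ l := by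
  induction l generalizing s with
  | nil => simp
  | cons y rest ih => simp [List.foldl, ih, PySem.Set.mem_discard]; tauto

-- membership in A's second (nested discard) loop
theorem pv_mem_discardfold2 (E : List String) (s : PySem.Set String) (x : String) :
    x ∈ E.foldl (fun b skill => (pvSkillToolMapping.getD skill []).foldl PySem.Set.discard b) s ↔
      x ∈ s ∧ ∀ sk ∈ E, ¬ x ∈ pvSkillToolMapping.getD sk [] := by
  induction E generalizing s with
  | nil => simp
  | cons sk rest ih => simp [List.foldl, ih, pv_mem_discardfold]; tauto

-- the central fact about A: its final blocked set holds exactly the mapped tools claimed by no enabled skill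
theorem pv_blocked_iff (E : List String) (x : String) :
    (x ∈ E.foldl (fun b skill => (pvSkillToolMapping.getD skill []).foldl PySem.Set.discard b)
        (pvSkillToolMapping.items.foldl
          (fun b p => if (PySem.Set.ofList E).contains p.1 then b else PySem.Set.update b p.2)
          PySem.Set.empty)) ↔
      ((∃ ts ∈ pvSkillToolMapping.values, x ∈ ts) ∧
        ¬ ∃ sk ∈ E, x ∈ pvSkillToolMapping.getD sk []) := by
  rw [pv_mem_discardfold2, pv_mem_blockfold]
  constructor
  · rintro ⟨hblk, hna⟩
    rcases hblk with h | ⟨p, hp, _, hx⟩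
    · exact absurd h (by simp [PySem.Set.empty])
    · refine ⟨⟨p.2, ?_, hx⟩, ?_⟩
      · revert hp
        have : ∀ q ∈ pvSkillToolMapping.items, q.2 ∈ pvSkillToolMapping.values := by decide
        exact fun hp => this p hp
      · rintro ⟨sk, hsk, hxsk⟩; exact hna sk hsk hxsk
  · rintro ⟨⟨ts, hts, hx⟩, hnall⟩
    have hna : ∀ sk ∈ E, ¬ x ∈ pvSkillToolMapping.getD sk [] := by
      intro sk hsk hxsk; exact hnall ⟨sk, hsk, hxsk⟩
    refine ⟨Or.inr ?_, hna⟩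
    have hkey : ∃ p ∈ pvSkillToolMapping.items, p.2 = ts := by
      revert hts
      have h9 : ∀ ts' ∈ pvSkillToolMapping.values, ∃ p ∈ pvSkillToolMapping.items, p.2 = ts' := by decide
      exact h9 ts
    rcases hkey with ⟨p, hp, hpts⟩
    have hgetD : pvSkillToolMapping.getD p.1 [] = p.2 := by
      revert hp
      have h9 : ∀ q ∈ pvSkillToolMapping.items, pvSkillToolMapping.getD q.1 [] = q.2 := by decide
      exact fun hp => h9 p hp
    have hknotE : ¬ p.1 ∈ PySem.Set.ofList E := by
      rw [PySem.Set.mem_ofList]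
      intro hkE
      exact hna p.1 hkE (by rw [hgetD, hpts]; exact hx)
    exact ⟨p, hp, hknotE, hpts ▸ hx⟩

-- x is a key of the inverted index exactly when some skill's tool list contains x
set_option maxRecDepth 8192 in
theorem pv_idx_contains_iff (x : String) :
    pvToolToSkills.contains x = true ↔ ∃ ts ∈ pvSkillToolMapping.values, x ∈ ts := by
  constructor
  · intro h
    rw [PySem.Dict.contains_eq_isSome_get? _ _] at h
    cases hg : pvToolToSkills.get? x with
    | none => rw [hg] at h; exact absurd h (by simp)
    | some owners =>
      have hmem : (x, owners) ∈ pvToolToSkills.items :=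
        PySem.Dict.mem_items_of_get?_eq_some _ hg
      have hF2 : ∀ q ∈ pvToolToSkills.items, ∃ ts ∈ pvSkillToolMapping.values, q.1 ∈ ts := by decide
      exact hF2 (x, owners) hmem
  · rintro ⟨ts, hts, hx⟩
    have hsome : ∀ ts' ∈ pvSkillToolMapping.values, ∀ t ∈ ts', pvToolToSkills.contains t = true := by decide
    exact hsome ts hts x hx

-- the owners list of x in the index holds exactly the skills whose tool list contains x
set_option maxRecDepth 8192 in
theorem pv_idx_owners_iff (x sk : String) :
    sk ∈ pvToolToSkills.getD x [] ↔ x ∈ pvSkillToolMapping.getD sk [] := by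
  have hnodup : pvToolToSkills.keys.Nodup := by decide
  constructor
  · intro h
    cases hg : pvToolToSkills.get? x with
    | none => rw [PySem.Dict.getD_of_get?_eq_none _ _ hg] at h; exact absurd h (by simp)
    | some owners =>
      rw [PySem.Dict.getD_of_get?_eq_some _ _ hg] at h
      have hmem : (x, owners) ∈ pvToolToSkills.items :=
        PySem.Dict.mem_items_of_get?_eq_some _ hg
      have hF3 : ∀ q ∈ pvToolToSkills.items, ∀ s ∈ q.2, q.1 ∈ pvSkillToolMapping.getD s [] := by decide
      exact hF3 (x, owners) hmem sk h
  · intro h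
    cases hgm : pvSkillToolMapping.get? sk with
    | none => rw [PySem.Dict.getD_of_get?_eq_none _ _ hgm] at h; exact absurd h (by simp)
    | some v =>
      rw [PySem.Dict.getD_of_get?_eq_some _ _ hgm] at h
      have hpm : (sk, v) ∈ pvSkillToolMapping.items :=
        PySem.Dict.mem_items_of_get?_eq_some _ hgm
      have hF4 : ∀ p ∈ pvSkillToolMapping.items, ∀ t ∈ p.2,
          ∃ q ∈ pvToolToSkills.items, q.1 = t ∧ p.1 ∈ q.2 := by decide
      rcases hF4 (sk, v) hpm x h with ⟨q, hq, hq1, hq2⟩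
      have hgq : pvToolToSkills.get? q.1 = some q.2 :=
        PySem.Dict.get?_of_mem_items _ hq hnodup
      rw [hq1] at hgq
      rw [PySem.Dict.getD_of_get?_eq_some _ _ hgq]
      exact hq2

-- pointwise bridge: A's "not blocked" test equals B's inverted-index test
theorem pv_notblocked_eq (E : List String) (x : String) :
    (!((E.foldl (fun b skill => (pvSkillToolMapping.getD skill []).foldl PySem.Set.discard b)
        (pvSkillToolMapping.items.foldl
          (fun b p => if (PySem.Set.ofList E).contains p.1 then b else PySem.Set.update b p.2)
          PySem.Set.empty)).contains x)) =
      (!(pvToolToSkills.contains x) ||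
        ((pvToolToSkills.getD x []).any (fun s => (PySem.Set.ofList E).contains s))) := by
  rw [Bool.eq_iff_iff, Bool.not_eq_true', Bool.eq_false_iff, ne_eq,
    PySem.Set.contains_iff, pv_blocked_iff]
  simp only [Bool.or_eq_true, Bool.not_eq_true', Bool.eq_false_iff, ne_eq, List.any_eq_true,
    pv_idx_contains_iff, pv_idx_owners_iff, PySem.Set.contains_iff, PySem.Set.mem_ofList]
  constructor
  · intro h
    by_cases hm : ∃ ts ∈ pvSkillToolMapping.values, x ∈ ts
    · right
      by_contra hc
      push Not at hc
      exact h ⟨hm, fun ⟨sk, hskE, hxsk⟩ => hc sk hxsk hskE⟩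
    · exact Or.inl hm
  · rintro (hnm | ⟨s, hxs, hsE⟩) ⟨hm, hno⟩
    · exact hnm hm
    · exact hno ⟨s, hsE, hxs⟩

-- ===== VERDICT (by name: the statement is the Claim_ definition above) =====
theorem get_allowed_mcp_tools_spec : Claim_equal_get_allowed_mcp_tools := by
  intro all_tool_names enabled_skills _
  unfold Spec_get_allowed_mcp_tools
  cases enabled_skills with
  | none => rfl
  | some E =>
    simp only [get_allowed_mcp_tools, get_allowed_mcp_tools_alt]
    apply List.filter_congr
    intro t _
    rw [pv_notblocked_eq E (PySem.Str.slice t (some (PySem.Str.len "mcp__databricks__")) none),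
      Bool.or_assoc]
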